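-- pv_equiv track=rewrite | github.com/chich2/Algorithm | Code_Ground/scpc5_cell_raising.py | compare_points_for_max_length
-- ===== SOURCE A (Python) =====
-- def max_length_from_point(point, set_of_points):
--     x_point = point
--     y_point = 0
--     half_length = 0
--
--     while True:
--         for i in range(x_point - half_length, x_point + half_length +1):
--             for j in range(y_point - half_length, y_point + half_length +1):
--                 if [i,j] in set_of_points:
--                     return half_length * 2
--
--         half_length += 1
--
-- def compare_points_for_max_length(line, set_of_points):
--     start_point = line[0]
--     end_point = line[1] +1
--     max_line = 0
--     for point in range(start_point, end_point):
--         temp_line = max_length_from_point(point, set_of_points)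
--         if max_line < temp_line:
--             max_line = temp_line
--     return max_line
-- ===== SOURCE B (Python) =====
-- def compare_points_for_max_length(line, set_of_points):
--     # Direct arithmetic: nearest-point Chebyshev distance instead of growing squares.
--     pts = [(p[0], p[1]) for p in set_of_points if len(p) == 2]
--     best = 0
--     for x in range(line[0], line[1] + 1):
--         d = min(max(abs(px - x), abs(py)) for (px, py) in pts)
--         if best < 2 * d:
--             best = 2 * d
--     return best
-- ===== Notes on version B (the rewrite author's own statement) =====
-- stated objective: alternative
-- what changed: Replaces the expanding Chebyshev-square membership scan around each query point with a direct one-pass minimum of max(|px-x|,|py|) over the 2-coordinate points.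
import Mathlib
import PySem

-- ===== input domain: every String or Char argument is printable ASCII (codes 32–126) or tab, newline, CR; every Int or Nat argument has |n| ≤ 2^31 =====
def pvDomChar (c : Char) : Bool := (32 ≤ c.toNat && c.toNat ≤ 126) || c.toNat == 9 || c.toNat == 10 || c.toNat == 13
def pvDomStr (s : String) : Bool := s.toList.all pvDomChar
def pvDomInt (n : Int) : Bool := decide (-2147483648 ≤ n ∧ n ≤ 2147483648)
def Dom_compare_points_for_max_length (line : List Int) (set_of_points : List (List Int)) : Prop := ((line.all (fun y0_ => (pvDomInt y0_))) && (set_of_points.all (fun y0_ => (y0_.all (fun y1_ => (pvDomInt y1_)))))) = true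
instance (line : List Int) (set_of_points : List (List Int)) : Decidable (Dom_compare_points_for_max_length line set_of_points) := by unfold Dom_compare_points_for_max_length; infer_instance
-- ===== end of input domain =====

-- B computes each query's answer as twice the least Chebyshev distance to a 2-coordinate point
-- in one pass over the points, instead of A's expanding-square membership scan.

-- ===== PORT A =====
-- the two nested 'for' loops of one iteration of A's 'while True' (any match = A returns there)
def pvScan (set_of_points : List (List Int)) (x hl : Int) : Bool :=
  (PySem.List.pyRange (x - hl) (x + hl + 1) 1).any (fun i =>
    (PySem.List.pyRange (0 - hl) (0 + hl + 1) 1).any (fun j =>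
      set_of_points.contains [i, j]))

-- A's 'while True' loop; the fuel argument is only a totality guard (Python diverges exactly
-- where no fuel suffices, and Pre_ excludes those inputs)
def pvLoop (set_of_points : List (List Int)) (x : Int) : Nat → Int → Int
  | 0, _ => 0
  | n + 1, hl => if pvScan set_of_points x hl then hl * 2 else pvLoop set_of_points x n (hl + 1)

def pvFuelOf (x : Int) (p : List Int) : Nat :=
  match p with
  | [a, b] => (a - x).natAbs.max b.natAbs + 1
  | _ => 0

def pvFuel (x : Int) (set_of_points : List (List Int)) : Nat :=
  set_of_points.foldl (fun acc p => max acc (pvFuelOf x p)) 0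

def max_length_from_point (point : Int) (set_of_points : List (List Int)) : Int :=
  pvLoop set_of_points point (pvFuel point set_of_points) 0

def compare_points_for_max_length (line : List Int) (set_of_points : List (List Int)) : Int :=
  match PySem.List.pyGet? line 0, PySem.List.pyGet? line 1 with
  | some start_point, some ep =>
      (PySem.List.pyRange start_point (ep + 1) 1).foldl
        (fun max_line point =>
          if max_line < max_length_from_point point set_of_points
          then max_length_from_point point set_of_points else max_line) 0
  | _, _ => 0   -- line[0]/line[1] raises IndexError: excluded by Pre_

-- ===== PORT B =====
-- [(p[0], p[1]) for p in set_of_points if len(p) == 2]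
def pvPairs (set_of_points : List (List Int)) : List (Int × Int) :=
  set_of_points.filterMap (fun p =>
    if p.length = 2 then some (p.getD 0 0, p.getD 1 0) else none)

-- max(abs(px - x), abs(py))
def pvCheb (x : Int) (q : Int × Int) : Int := max |q.1 - x| |q.2|

def compare_points_for_max_length_alt (line : List Int) (set_of_points : List (List Int)) : Int :=
  let pts := pvPairs set_of_points
  match PySem.List.pyGet? line 0 with
  | none => 0
  | some s =>
    match PySem.List.pyGet? line 1 with
    | none => 0
    | some e =>
        (PySem.List.pyRange s (e + 1) 1).foldl
          (fun best x =>
            let d := (PySem.List.min? (pts.map (pvCheb x)) (fun y => y)).getD 0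
            if best < 2 * d then 2 * d else best) 0

-- ===== PRECONDITION & SPEC =====
-- Pre_ excludes inputs where A raises (line shorter than 2: IndexError) or diverges (a nonempty
-- query range with no 2-coordinate point in set_of_points: A's square grows forever).
def Pre_compare_points_for_max_length (line : List Int) (set_of_points : List (List Int)) : Prop :=
  2 ≤ line.length ∧ (line.getD 1 0 < line.getD 0 0 ∨ ∃ p ∈ set_of_points, p.length = 2)
instance (line : List Int) (set_of_points : List (List Int)) : Decidable (Pre_compare_points_for_max_length line set_of_points) := by unfold Pre_compare_points_for_max_length; infer_instance

def pvWitness_compare_points_for_max_length : List Int × List (List Int) := ([0, 2], [[1, 1]])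

def Spec_compare_points_for_max_length (line : List Int) (set_of_points : List (List Int)) (out : Int) : Prop := out = compare_points_for_max_length_alt line set_of_points
instance (line : List Int) (set_of_points : List (List Int)) (out : Int) : Decidable (Spec_compare_points_for_max_length line set_of_points out) := by unfold Spec_compare_points_for_max_length; infer_instance

-- ===== CLAIM (what is proved, stated in full; the proofs are below) =====
def Claim_equal_compare_points_for_max_length : Prop := ∀ (line : List Int) (set_of_points : List (List Int)), Dom_compare_points_for_max_length line set_of_points → Pre_compare_points_for_max_length line set_of_points → Spec_compare_points_for_max_length line set_of_points (compare_points_for_max_length line set_of_points)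

-- ===== LEMMAS AND PROOFS =====

theorem mem_pvPairs (S : List (List Int)) (a b : Int) :
    (a, b) ∈ pvPairs S ↔ [a, b] ∈ S := by
  simp only [pvPairs, List.mem_filterMap]
  constructor
  · rintro ⟨p, hp, he⟩
    rcases p with _ | ⟨u, _ | ⟨v, _ | ⟨w, t⟩⟩⟩ <;> simp_all
  · intro h
    refine ⟨[a, b], h, ?_⟩
    simp
theorem pvScan_iff (S : List (List Int)) (x hl : Int) :
    pvScan S x hl = true ↔ ∃ q ∈ pvPairs S, pvCheb x q ≤ hl := by
  unfold pvScan
  simp only [List.any_eq_true, PySem.List.mem_pyRange_one, List.contains_iff_mem]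
  constructor
  · rintro ⟨i, ⟨hi1, hi2⟩, j, ⟨hj1, hj2⟩, hm⟩
    refine ⟨(i, j), (mem_pvPairs S i j).2 hm, ?_⟩
    simp only [pvCheb]
    rw [max_le_iff, abs_le, abs_le]
    omega
  · rintro ⟨⟨a, b⟩, hq, hc⟩
    simp only [pvCheb] at hc
    rw [max_le_iff, abs_le, abs_le] at hc
    exact ⟨a, by omega, b, by omega, (mem_pvPairs S a b).1 hq⟩

theorem pvLoop_eq (S : List (List Int)) (x d : Int)
    (hiff : ∀ hl : Int, 0 ≤ hl → (pvScan S x hl = true ↔ d ≤ hl)) :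
    ∀ (fuel : Nat) (hl : Int), 0 ≤ hl → hl ≤ d → (d - hl).toNat < fuel →
      pvLoop S x fuel hl = 2 * d := by
  intro fuel
  induction fuel with
  | zero => intro hl _ _ h2; omega
  | succ n ih =>
    intro hl h0 h1 h2
    simp only [pvLoop]
    by_cases hs : pvScan S x hl = true
    · rw [if_pos hs]
      have hle := (hiff hl h0).1 hs
      have : hl = d := le_antisymm h1 hle
      omega
    · rw [if_neg hs]
      have hdl : ¬ d ≤ hl := fun h => hs ((hiff hl h0).2 h)
      exact ih (hl + 1) (by omega) (by omega) (by omega)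

theorem per_point (S : List (List Int)) (x : Int) (hne : pvPairs S ≠ []) :
    max_length_from_point x S
      = 2 * ((PySem.List.min? ((pvPairs S).map (pvCheb x)) (fun y => y)).getD 0) := by
  rcases hmq : PySem.List.min? ((pvPairs S).map (pvCheb x)) (fun y => y) with _ | d
  · rw [PySem.List.min?_eq_none_iff] at hmq
    exact absurd (List.map_eq_nil_iff.mp hmq) hne
  have hmem : d ∈ (pvPairs S).map (pvCheb x) := PySem.List.min?_mem hmq
  have hmin : ∀ y ∈ (pvPairs S).map (pvCheb x), d ≤ y := PySem.List.min?_isMin hmq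
  obtain ⟨q0, hq0, hq0e⟩ := List.mem_map.mp hmem
  have hd0 : 0 ≤ d := by
    rw [← hq0e]
    exact le_trans (abs_nonneg _) (le_max_left _ _)
  have hiff : ∀ hl : Int, 0 ≤ hl → (pvScan S x hl = true ↔ d ≤ hl) := by
    intro hl _
    rw [pvScan_iff]
    constructor
    · rintro ⟨q, hq, hc⟩
      exact le_trans (hmin _ (List.mem_map_of_mem hq)) hc
    · intro h
      exact ⟨q0, hq0, by rw [hq0e]; exact h⟩
  -- fuel sufficiency
  obtain ⟨p0, hp0⟩ := List.exists_mem_of_ne_nil _ hne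
  rcases p0 with ⟨a, b⟩
  have hab : [a, b] ∈ S := (mem_pvPairs S a b).1 hp0
  have hfuel : pvFuelOf x [a, b] ≤ pvFuel x S :=
    (PySem.List.le_foldl_max_nat S (pvFuelOf x) 0).2 _ hab
  have hcheb : pvCheb x (a, b) = (((a - x).natAbs.max b.natAbs : Nat) : Int) := by
    show max |a - x| |b| = _
    rw [Int.abs_eq_natAbs, Int.abs_eq_natAbs, ← Nat.cast_max]
  have hdle : d ≤ (((a - x).natAbs.max b.natAbs : Nat) : Int) := by
    rw [← hcheb]
    exact hmin _ (List.mem_map_of_mem hp0)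
  have hfo : pvFuelOf x [a, b] = (a - x).natAbs.max b.natAbs + 1 := rfl
  simp only [max_length_from_point, Option.getD_some]
  exact pvLoop_eq S x d hiff (pvFuel x S) 0 le_rfl hd0 (by omega)

theorem foldl_A_eq_B (S : List (List Int)) (hne : pvPairs S ≠ []) :
    ∀ (R : List Int) (init : Int),
      R.foldl (fun max_line point =>
          if max_line < max_length_from_point point S
          then max_length_from_point point S else max_line) init
        = R.foldl (fun best x =>
            let d := (PySem.List.min? ((pvPairs S).map (pvCheb x)) (fun y => y)).getD 0
            if best < 2 * d then 2 * d else best) init := by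
  intro R
  induction R with
  | nil => intro init; rfl
  | cons h t ih =>
    intro init
    simp only [List.foldl_cons]
    rw [per_point S h hne]
    exact ih _

-- ===== VERDICT (by name: the statement is the Claim_ definition above) =====
theorem compare_points_for_max_length_spec : Claim_equal_compare_points_for_max_length := by
  intro line S _ hpre
  obtain ⟨hlen, hcase⟩ := hpre
  rcases line with _ | ⟨a, _ | ⟨b, t⟩⟩
  · simp at hlen
  · simp at hlen
  have h0 : PySem.List.pyGet? (a :: b :: t) (0 : Int) = some a :=
    PySem.List.pyGet?_zero_cons a (b :: t)
  have h1 : PySem.List.pyGet? (a :: b :: t) (1 : Int) = some b := by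
    rw [show (1 : Int) = ((1 : Nat) : Int) from rfl, PySem.List.pyGet?_natCast]
    rfl
  unfold Spec_compare_points_for_max_length compare_points_for_max_length
    compare_points_for_max_length_alt
  simp only [h0, h1, List.getD_cons_zero, List.getD_cons_succ] at hcase ⊢
  rcases hcase with hlt | ⟨p, hp, hl2⟩
  · rw [PySem.List.pyRange_one_eq_nil (by omega)]
    rfl
  · have hne : pvPairs S ≠ [] := by
      rcases p with _ | ⟨u, _ | ⟨v, _ | ⟨w, r⟩⟩⟩ <;> simp at hl2
      exact List.ne_nil_of_mem ((mem_pvPairs S u v).2 hp)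
    exact foldl_A_eq_B S hne _ 0
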